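-- pv_equiv track=rewrite | github.com/3amberloaf/Practice-Problems | strings/non_contingous_reviews_answer.py | find_longest_substring_without_prohibited_subsequences
-- ===== SOURCE A (Python) =====
-- def find_longest_substring_without_prohibited_subsequences(review, prohibited_words):
--     def is_subsequence(s, sub):
--         sub_iter = iter(sub)
--         return all(char in sub_iter for char in s)
--
--     n = len(review)
--     longest = 0
--     longest_substring = ""
--
--     for start in range(n):
--         for end in range(n, start + longest, -1):  # Decrease end, start from n to start+longest
--             substring = review[start:end]
--             if any(is_subsequence(word, substring) for word in prohibited_words):
--                 continue  # Skip to the next substring if any prohibited word is a subsequence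
--             if len(substring) > longest:
--                 longest = len(substring)
--                 longest_substring = substring
--                 break  # Found a longer valid substring, no need to check shorter ones
--
--     return longest, longest_substring
-- ===== SOURCE B (Python) =====
-- def find_longest_substring_without_prohibited_subsequences(review, prohibited_words):
--     # An empty prohibited word is a subsequence of every substring: nothing is valid.
--     if any(w == "" for w in prohibited_words):
--         return 0, ""
--     n = len(review)
--     longest = 0
--     longest_substring = ""
--     for start in range(n):
--         # Extend the window forward, tracking for each word how much of it has
--         # been greedily matched as a subsequence; stop when any word completes.
--         ptrs = [0] * len(prohibited_words)
--         count = 0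
--         for ch in review[start:]:
--             blocked = False
--             for i, w in enumerate(prohibited_words):
--                 if w[ptrs[i]] == ch:
--                     ptrs[i] += 1
--                     if ptrs[i] == len(w):
--                         blocked = True
--             if blocked:
--                 break
--             count += 1
--         if count > longest:
--             longest = count
--             longest_substring = review[start:start + count]
--     return longest, longest_substring
-- ===== Notes on version B (the rewrite author's own statement) =====
-- stated objective: faster
-- what changed: A shrinks a window from each start, re-extracting every substring and re-running the full subsequence test for every word at every end; B makes one forward pass per start, keeping a matched-prefix pointer per prohibited word and stopping at the first position where any word completes as a subsequence.
import Mathlib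
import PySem

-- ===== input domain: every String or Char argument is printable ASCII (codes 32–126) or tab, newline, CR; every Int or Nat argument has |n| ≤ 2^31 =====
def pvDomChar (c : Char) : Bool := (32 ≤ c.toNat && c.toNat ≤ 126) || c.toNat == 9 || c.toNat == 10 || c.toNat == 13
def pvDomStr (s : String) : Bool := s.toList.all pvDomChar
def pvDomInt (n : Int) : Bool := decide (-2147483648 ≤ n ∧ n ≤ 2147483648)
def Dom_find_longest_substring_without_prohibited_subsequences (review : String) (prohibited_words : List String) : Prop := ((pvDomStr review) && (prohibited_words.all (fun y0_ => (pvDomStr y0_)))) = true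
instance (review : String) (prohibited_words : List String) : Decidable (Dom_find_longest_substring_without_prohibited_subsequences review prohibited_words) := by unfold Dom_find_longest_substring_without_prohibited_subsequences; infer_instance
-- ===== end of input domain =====

-- B replaces A's cubic shrink-the-window rescans by, per start, one forward greedy
-- extension that tracks a matched-prefix pointer for every prohibited word (objective: faster).

-- ===== PORT A =====
def pvDropAfter (c : Char) : List Char → Option (List Char)
  | [] => none
  | x :: xs => if x = c then some xs else pvDropAfter c xs

def pvIsSubseq : List Char → List Char → Bool
  | [], _ => true
  | c :: rest, sub =>
      match pvDropAfter c sub with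
      | none => false
      | some sub' => pvIsSubseq rest sub'

def pvInnerA (review : String) (words : List String) (start : Int) :
    List Int → Int → String → Int × String
  | [], longest, lsub => (longest, lsub)
  | e :: rest, longest, lsub =>
      let substring := PySem.Str.slice review (some start) (some e)
      if words.any (fun w => pvIsSubseq w.toList substring.toList) then
        pvInnerA review words start rest longest lsub
      else if ((PySem.Str.len substring : Int) > longest) then
        ((PySem.Str.len substring : Int), substring)
      else
        pvInnerA review words start rest longest lsub

def find_longest_substring_without_prohibited_subsequences (review : String) (prohibited_words : List String) : Int × String :=
  let n : Int := (PySem.Str.len review : Int)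
  (PySem.List.pyRange 0 n 1).foldl
    (fun st start =>
      pvInnerA review prohibited_words start
        (PySem.List.pyRange n (start + st.1) (-1)) st.1 st.2)
    (0, "")

-- ===== PORT B =====
def pvAdvance (c : Char) : List String → List Int → List Int × Bool
  | w :: ws, p :: ps =>
      let r := pvAdvance c ws ps
      if PySem.Str.pyGet? w p = some c then
        ((p + 1) :: r.1, r.2 || (p + 1 == (PySem.Str.len w : Int)))
      else (p :: r.1, r.2)
  | _, _ => ([], false)

def pvExtend (words : List String) : List Int → Int → List Char → Int
  | _, count, [] => count
  | ptrs, count, c :: rest =>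
      let r := pvAdvance c words ptrs
      if r.2 then count else pvExtend words r.1 (count + 1) rest

def find_longest_substring_without_prohibited_subsequences_alt (review : String) (prohibited_words : List String) : Int × String :=
  if prohibited_words.any (fun w => w == "") then (0, "")
  else
    let n : Int := (PySem.Str.len review : Int)
    (PySem.List.pyRange 0 n 1).foldl
      (fun st start =>
        let count := pvExtend prohibited_words
          (prohibited_words.map (fun _ => (0 : Int))) 0
          (PySem.Str.slice review (some start) none).toList
        if count > st.1 then
          (count, PySem.Str.slice review (some start) (some (start + count)))
        else st)
      (0, "")

-- ===== PRECONDITION & SPEC =====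
def Spec_find_longest_substring_without_prohibited_subsequences (review : String) (prohibited_words : List String) (out : Int × String) : Prop := out = find_longest_substring_without_prohibited_subsequences_alt review prohibited_words
instance (review : String) (prohibited_words : List String) (out : Int × String) : Decidable (Spec_find_longest_substring_without_prohibited_subsequences review prohibited_words out) := by unfold Spec_find_longest_substring_without_prohibited_subsequences; infer_instance

-- ===== CLAIM (what is proved, stated in full; the proofs are below) =====
def Claim_equal_find_longest_substring_without_prohibited_subsequences : Prop := ∀ (review : String) (prohibited_words : List String), Dom_find_longest_substring_without_prohibited_subsequences review prohibited_words → Spec_find_longest_substring_without_prohibited_subsequences review prohibited_words (find_longest_substring_without_prohibited_subsequences review prohibited_words)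

-- ===== LEMMAS AND PROOFS =====
def pvGstep : List Char → Char → List Char
  | [], _ => []
  | d :: ds, c => if d = c then ds else d :: ds

def pvSpecCount : List (List Char) → List Char → Nat
  | _, [] => 0
  | rems, c :: cs =>
      let rems' := rems.map (fun r => pvGstep r c)
      if rems'.any List.isEmpty then 0 else pvSpecCount rems' cs + 1

theorem pvFoldl_gstep_nil (cs : List Char) : List.foldl pvGstep [] cs = [] := by
  induction cs with
  | nil => rfl
  | cons c cs ih => simpa [pvGstep] using ih

theorem pvIsSubseq_eq_foldl (cs : List Char) : ∀ w : List Char,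
    pvIsSubseq w cs = (List.foldl pvGstep w cs).isEmpty := by
  induction cs with
  | nil =>
    intro w
    cases w with
    | nil => rfl
    | cons d ds => simp [pvIsSubseq, pvDropAfter]
  | cons c cs ih =>
    intro w
    cases w with
    | nil => simp [pvIsSubseq, pvFoldl_gstep_nil, pvGstep]
    | cons d ds =>
      by_cases h : c = d
      · subst h
        simp [pvIsSubseq, pvDropAfter, pvGstep, ih]
      · have h2 : d ≠ c := fun hh => h hh.symm
        simp only [List.foldl_cons, pvGstep, if_neg h2]
        rw [← ih (d :: ds)]
        simp [pvIsSubseq, pvDropAfter, h]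

theorem pvSpecCount_le (cs : List Char) : ∀ rems, pvSpecCount rems cs ≤ cs.length := by
  induction cs with
  | nil => intro rems; simp [pvSpecCount]
  | cons c cs ih =>
    intro rems
    simp only [pvSpecCount]
    split
    · simp
    · simpa using Nat.succ_le_succ (ih _)

theorem pvBlocked_mono (cs : List Char) (w : List Char) {t t' : Nat}
    (h : List.foldl pvGstep w (cs.take t) = []) (ht : t ≤ t') :
    List.foldl pvGstep w (cs.take t') = [] := by
  have h1 : t + (t' - t) = t' := by omega
  have : cs.take t' = cs.take t ++ (cs.drop t).take (t' - t) := by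
    rw [← List.take_add, h1]
  rw [this, List.foldl_append, h, pvFoldl_gstep_nil]

theorem pvL3a (cs : List Char) : ∀ rems, (∀ r ∈ rems, r ≠ []) →
    ∀ t, t ≤ pvSpecCount rems cs → ∀ r ∈ rems, List.foldl pvGstep r (cs.take t) ≠ [] := by
  induction cs with
  | nil =>
    intro rems hne t ht r hr
    simp only [pvSpecCount] at ht
    interval_cases t
    simpa using hne r hr
  | cons c cs ih =>
    intro rems hne t ht r hr
    simp only [pvSpecCount] at ht
    by_cases hb : (rems.map (fun r => pvGstep r c)).any List.isEmpty
    · simp [hb] at ht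
      subst ht
      simpa using hne r hr
    · simp [hb] at ht
      cases t with
      | zero => simpa using hne r hr
      | succ t' =>
        simp only [List.take_succ_cons, List.foldl_cons]
        have hne' : ∀ r' ∈ rems.map (fun r => pvGstep r c), r' ≠ [] := by
          intro r' hr' he
          apply hb
          exact List.any_eq_true.mpr ⟨r', hr', by simp [he]⟩
        exact ih _ hne' t' (by omega) _ (List.mem_map_of_mem hr)

theorem pvL3b (cs : List Char) : ∀ rems, pvSpecCount rems cs < cs.length →
    ∃ r ∈ rems, List.foldl pvGstep r (cs.take (pvSpecCount rems cs + 1)) = [] := by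
  induction cs with
  | nil => intro rems h; simp at h
  | cons c cs ih =>
    intro rems h
    by_cases hb : (rems.map (fun r => pvGstep r c)).any List.isEmpty
    · simp only [pvSpecCount, hb, if_true]
      rcases List.any_eq_true.mp hb with ⟨r', hr', he⟩
      rcases List.mem_map.mp hr' with ⟨r, hr, rfl⟩
      exact ⟨r, hr, by simpa [List.isEmpty_iff] using he⟩
    · simp only [pvSpecCount, hb]
      have h' : pvSpecCount (rems.map (fun r => pvGstep r c)) cs < cs.length := by
        simp only [pvSpecCount, hb] at h
        simpa using h
      rcases ih _ h' with ⟨r', hr', he⟩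
      rcases List.mem_map.mp hr' with ⟨r, hr, rfl⟩
      refine ⟨r, hr, ?_⟩
      simpa [List.take_succ_cons, List.foldl_cons] using he

def pvPtrRel : List String → List Int → List (List Char) → Prop
  | [], [], [] => True
  | w :: ws, p :: ps, r :: rs =>
      (∃ k : Nat, p = (k : Int) ∧ k < w.toList.length ∧ r = w.toList.drop k) ∧ pvPtrRel ws ps rs
  | _, _, _ => False

theorem pvAdv_snd (c : Char) : ∀ (ws : List String) (ps : List Int) (rems : List (List Char)),
    pvPtrRel ws ps rems →
    (pvAdvance c ws ps).2 = (rems.map (fun r => pvGstep r c)).any List.isEmpty := by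
  intro ws
  induction ws with
  | nil =>
    intro ps rems h
    cases ps <;> cases rems <;> simp [pvPtrRel] at h ⊢
    simp [pvAdvance]
  | cons w ws ih =>
    intro ps rems h
    cases ps with
    | nil => cases rems <;> simp [pvPtrRel] at h
    | cons p ps =>
      cases rems with
      | nil => simp [pvPtrRel] at h
      | cons r rs =>
        obtain ⟨⟨k, hp, hk, hr⟩, htail⟩ := h
        have hget : PySem.Str.pyGet? w p = w.toList[k]? := by
          rw [hp]; simp
        have hgetsome : PySem.Str.pyGet? w p = some (w.toList[k]) := by
          rw [hget]; exact List.getElem?_eq_getElem hk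
        have hrcons : r = w.toList[k] :: w.toList.drop (k + 1) := by
          rw [hr, List.getElem_cons_drop]
        by_cases hc : w.toList[k] = c
        · have : PySem.Str.pyGet? w p = some c := by rw [hgetsome, hc]
          simp only [pvAdvance, this]
          rw [ih ps rs htail]
          simp only [List.map_cons, List.any_cons]
          have hg : pvGstep r c = w.toList.drop (k + 1) := by
            rw [hrcons]; simp [pvGstep, hc]
          rw [hg]
          have : ((w.toList.drop (k + 1)).isEmpty) = (p + 1 == (PySem.Str.len w : Int)) := by
            rw [Bool.eq_iff_iff]
            simp [List.isEmpty_iff, List.drop_eq_nil_iff, hp, -String.length_toList]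
            omega
          rw [this]
          exact Bool.or_comm _ _
        · have hne : ¬ (PySem.Str.pyGet? w p = some c) := by
            rw [hgetsome]; simp [hc]
          simp only [pvAdvance, if_neg hne]
          rw [ih ps rs htail]
          simp only [List.map_cons, List.any_cons]
          have hg : pvGstep r c = r := by
            rw [hrcons]; simp [pvGstep, hc]
          rw [hg, hrcons]
          simp only [List.isEmpty_cons, Bool.false_or]

theorem pvAdv_rel (c : Char) : ∀ (ws : List String) (ps : List Int) (rems : List (List Char)),
    pvPtrRel ws ps rems →
    (rems.map (fun r => pvGstep r c)).any List.isEmpty = false →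
    pvPtrRel ws (pvAdvance c ws ps).1 (rems.map (fun r => pvGstep r c)) := by
  intro ws
  induction ws with
  | nil =>
    intro ps rems h _
    cases ps <;> cases rems <;> simp [pvPtrRel] at h ⊢
    simp [pvAdvance, pvPtrRel]
  | cons w ws ih =>
    intro ps rems h hb
    cases ps with
    | nil => cases rems <;> simp [pvPtrRel] at h
    | cons p ps =>
      cases rems with
      | nil => simp [pvPtrRel] at h
      | cons r rs =>
        obtain ⟨⟨k, hp, hk, hr⟩, htail⟩ := h
        simp only [List.map_cons, List.any_cons, Bool.or_eq_false_iff] at hb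
        obtain ⟨hb1, hb2⟩ := hb
        have hgetsome : PySem.Str.pyGet? w p = some (w.toList[k]) := by
          rw [hp]; simp [List.getElem?_eq_getElem hk]
        have hrcons : r = w.toList[k] :: w.toList.drop (k + 1) := by
          rw [hr, List.getElem_cons_drop]
        by_cases hc : w.toList[k] = c
        · have hsome : PySem.Str.pyGet? w p = some c := by rw [hgetsome, hc]
          have hg : pvGstep r c = w.toList.drop (k + 1) := by
            rw [hrcons]; simp [pvGstep, hc]
          simp only [pvAdvance, hsome, if_pos, List.map_cons]
          refine ⟨⟨k + 1, by rw [hp]; push_cast; ring, ?_, by rw [hg]⟩, ih ps rs htail hb2⟩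
          have : ¬ (w.toList.drop (k + 1) = []) := by
            rw [hg] at hb1
            simpa [List.isEmpty_iff] using hb1
          rw [List.drop_eq_nil_iff] at this
          omega
        · have hne : ¬ (PySem.Str.pyGet? w p = some c) := by
            rw [hgetsome]; simp [hc]
          have hg : pvGstep r c = r := by
            rw [hrcons]; simp [pvGstep, hc]
          simp only [pvAdvance, if_neg hne, List.map_cons]
          exact ⟨⟨k, hp, hk, by rw [hg, hr]⟩, ih ps rs htail hb2⟩

theorem pvExtend_eq (words : List String) : ∀ (cs : List Char) (ps : List Int)
    (rems : List (List Char)) (count : Int), pvPtrRel words ps rems →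
    pvExtend words ps count cs = count + (pvSpecCount rems cs : Int) := by
  intro cs
  induction cs with
  | nil => intro ps rems count h; simp [pvExtend, pvSpecCount]
  | cons c cs ih =>
    intro ps rems count h
    have hsnd := pvAdv_snd c words ps rems h
    by_cases hb : (rems.map (fun r => pvGstep r c)).any List.isEmpty
    · simp only [pvExtend, hsnd, hb, if_pos, pvSpecCount]
      simp
    · have hb' : (rems.map (fun r => pvGstep r c)).any List.isEmpty = false := by
        simpa using hb
      simp only [pvExtend, hsnd, hb', pvSpecCount]
      rw [ih _ _ (count + 1) (pvAdv_rel c words ps rems h hb')]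
      simp
      ring

theorem pvPtrRel_init (words : List String) (hne : ∀ w ∈ words, w.toList ≠ []) :
    pvPtrRel words (words.map (fun _ => (0 : Int))) (words.map String.toList) := by
  induction words with
  | nil => simp [pvPtrRel]
  | cons w ws ih =>
    refine ⟨⟨0, rfl, ?_, by simp⟩, ih (fun x hx => hne x (by simp [hx]))⟩
    have := hne w (by simp)
    have : w.toList.length ≠ 0 := by simpa [List.length_eq_zero_iff] using this
    omega

theorem pvInnerA_invalid (review : String) (words : List String) (start : Int) :
    ∀ (ends : List Int) (longest : Int) (lsub : String),
    (∀ e ∈ ends, words.any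
      (fun w => pvIsSubseq w.toList (PySem.Str.slice review (some start) (some e)).toList) = true) →
    pvInnerA review words start ends longest lsub = (longest, lsub) := by
  intro ends
  induction ends with
  | nil => intro longest lsub _; rfl
  | cons e rest ih =>
    intro longest lsub hall
    simp only [pvInnerA]
    rw [if_pos (hall e (by simp))]
    exact ih longest lsub (fun e' he' => hall e' (by simp [he']))

theorem pvInnerA_append_invalid (review : String) (words : List String) (start : Int)
    (ends₂ : List Int) : ∀ (ends₁ : List Int) (longest : Int) (lsub : String),
    (∀ e ∈ ends₁, words.any
      (fun w => pvIsSubseq w.toList (PySem.Str.slice review (some start) (some e)).toList) = true) →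
    pvInnerA review words start (ends₁ ++ ends₂) longest lsub
      = pvInnerA review words start ends₂ longest lsub := by
  intro ends₁
  induction ends₁ with
  | nil => intro longest lsub _; rfl
  | cons e rest ih =>
    intro longest lsub hall
    simp only [List.cons_append, pvInnerA]
    rw [if_pos (hall e (by simp))]
    exact ih longest lsub (fun e' he' => hall e' (by simp [he']))

theorem pvSliceToList (review : String) (s t : Nat) :
    (PySem.Str.slice review (some (s : Int)) (some ((s : Int) + (t : Int)))).toList
      = (review.toList.drop s).take t := by
  simp [PySem.Str.toList_slice, PySem.List.slice_natCast_add]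

theorem pvRangeNegSplit (a b mid : Int) (h1 : b ≤ mid) (h2 : mid ≤ a) :
    PySem.List.pyRange a b (-1)
      = PySem.List.pyRange a mid (-1) ++ PySem.List.pyRange mid b (-1) := by
  rw [PySem.List.pyRange_neg_one_eq_reverse, PySem.List.pyRange_neg_one_eq_reverse,
    PySem.List.pyRange_neg_one_eq_reverse,
    PySem.List.pyRange_one_append (b + 1) (mid + 1) (a + 1) (by omega) (by omega),
    List.reverse_append]

theorem pvTest_false (review : String) (words : List String)
    (hne : ∀ w ∈ words, w.toList ≠ []) (s t : Nat)
    (ht : t ≤ pvSpecCount (words.map String.toList) (review.toList.drop s)) :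
    words.any (fun w => pvIsSubseq w.toList ((review.toList.drop s).take t)) = false := by
  apply List.any_eq_false.mpr
  intro w hw
  rw [pvIsSubseq_eq_foldl]
  have := pvL3a (review.toList.drop s) (words.map String.toList)
    (by intro r hr; rcases List.mem_map.mp hr with ⟨w', hw', rfl⟩; exact hne w' hw')
    t ht w.toList (List.mem_map_of_mem hw)
  simpa [List.isEmpty_iff] using this

theorem pvTest_true (review : String) (words : List String) (s t : Nat)
    (ht : pvSpecCount (words.map String.toList) (review.toList.drop s) < t)
    (htn : t ≤ review.toList.length - s) :
    words.any (fun w => pvIsSubseq w.toList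
      (PySem.Str.slice review (some (s : Int)) (some ((s : Int) + (t : Int)))).toList) = true := by
  rw [pvSliceToList]
  have hlen : pvSpecCount (words.map String.toList) (review.toList.drop s)
      < (review.toList.drop s).length := by
    rw [List.length_drop]; omega
  rcases pvL3b (review.toList.drop s) (words.map String.toList) hlen with ⟨r, hr, he⟩
  rcases List.mem_map.mp hr with ⟨w, hw, rfl⟩
  apply List.any_eq_true.mpr
  refine ⟨w, hw, ?_⟩
  rw [pvIsSubseq_eq_foldl]
  have := pvBlocked_mono (review.toList.drop s) w.toList he (by omega : _ + 1 ≤ t)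
  simp [this]

theorem pvInnerA_char (review : String) (words : List String)
    (hne : ∀ w ∈ words, w.toList ≠ []) (s L : Nat) (hs : s ≤ review.toList.length)
    (lsub : String) :
    pvInnerA review words (s : Int)
      (PySem.List.pyRange (review.toList.length : Int) ((s : Int) + (L : Int)) (-1)) (L : Int) lsub
      = if L < pvSpecCount (words.map String.toList) (review.toList.drop s)
        then ((pvSpecCount (words.map String.toList) (review.toList.drop s) : Int),
              PySem.Str.slice review (some (s : Int))
                (some ((s : Int) + (pvSpecCount (words.map String.toList) (review.toList.drop s) : Int))))
        else ((L : Int), lsub) := by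
  set n := review.toList.length with hn
  set m := pvSpecCount (words.map String.toList) (review.toList.drop s) with hmdef
  have hmle : m ≤ n - s := by
    have := pvSpecCount_le (review.toList.drop s) (words.map String.toList)
    rwa [List.length_drop] at this
  by_cases hL : L < m
  · rw [pvRangeNegSplit (n : Int) ((s : Int) + (L : Int)) ((s : Int) + (m : Int))
      (by omega) (by omega)]
    rw [pvInnerA_append_invalid]
    · rw [PySem.List.pyRange_neg_one_cons (by omega)]
      simp only [pvInnerA]
      rw [pvSliceToList]
      have htest := pvTest_false review words hne s m (le_refl m)
      rw [if_neg (by simp [htest])]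
      have hlen : ((PySem.Str.len (PySem.Str.slice review (some (s : Int))
          (some ((s : Int) + (m : Int))))) : Int) = (m : Int) := by
        rw [PySem.Str.len_eq, pvSliceToList]
        simp [List.length_take]
        have h2 : review.toList.length = review.length := by simp
        omega
      rw [if_pos (by rw [hlen]; exact_mod_cast hL)]
      rw [if_pos hL, hlen]
    · intro e he
      rw [PySem.List.mem_pyRange_neg_one] at he
      obtain ⟨h1, h2⟩ := he
      have het : e = (s : Int) + ((e - (s : Int)).toNat : Int) := by omega
      rw [het]
      exact pvTest_true review words s _ (by omega) (by omega)
  · rw [pvInnerA_invalid]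
    · rw [if_neg hL]
    · intro e he
      rw [PySem.List.mem_pyRange_neg_one] at he
      obtain ⟨h1, h2⟩ := he
      have het : e = (s : Int) + ((e - (s : Int)).toNat : Int) := by omega
      rw [het]
      exact pvTest_true review words s _ (by omega) (by omega)

theorem pvFoldl_fixed {α β : Type} (f : α → β → α) (st : α) :
    ∀ l : List β, (∀ a b, f a b = a) → l.foldl f st = st := by
  intro l
  induction l generalizing st with
  | nil => intro _; rfl
  | cons x xs ih => intro h; rw [List.foldl_cons, h]; exact ih st h

theorem pvA_empty_word (review : String) (words : List String)
    (h : ∃ w ∈ words, w.toList = []) :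
    find_longest_substring_without_prohibited_subsequences review words = (0, "") := by
  unfold find_longest_substring_without_prohibited_subsequences
  apply pvFoldl_fixed
  intro st start
  obtain ⟨w₀, hw₀, hw₀nil⟩ := h
  have : pvInnerA review words start
      (PySem.List.pyRange (PySem.Str.len review) (start + st.1) (-1)) st.1 st.2 = (st.1, st.2) := by
    apply pvInnerA_invalid
    intro e _
    exact List.any_eq_true.mpr ⟨w₀, hw₀, by rw [hw₀nil]; rfl⟩
  simpa using this

theorem pvFold_eq (review : String) (words : List String)
    (hne : ∀ w ∈ words, w.toList ≠ []) :
    ∀ (ss : List Nat), (∀ s ∈ ss, s ≤ review.toList.length) → ∀ (L : Nat) (lsub : String),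
    (ss.map (fun k : Nat => (k : Int))).foldl
      (fun st start =>
        pvInnerA review words start
          (PySem.List.pyRange (PySem.Str.len review) (start + st.1) (-1)) st.1 st.2)
      ((L : Int), lsub)
    = (ss.map (fun k : Nat => (k : Int))).foldl
      (fun st start =>
        let count := pvExtend words (words.map (fun _ => (0 : Int))) 0
          (PySem.Str.slice review (some start) none).toList
        if count > st.1 then
          (count, PySem.Str.slice review (some start) (some (start + count)))
        else st)
      ((L : Int), lsub) := by
  intro ss
  induction ss with
  | nil => intro _ L lsub; rfl
  | cons s ss ih =>
    intro hss L lsub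
    have hs : s ≤ review.toList.length := hss s (by simp)
    set m := pvSpecCount (words.map String.toList) (review.toList.drop s) with hmdef
    have hA : pvInnerA review words (s : Int)
        (PySem.List.pyRange (PySem.Str.len review) ((s : Int) + (L : Int)) (-1)) (L : Int) lsub
        = if L < m then ((m : Int), PySem.Str.slice review (some (s : Int))
            (some ((s : Int) + (m : Int))))
          else ((L : Int), lsub) := by
      rw [PySem.Str.len_eq]
      exact pvInnerA_char review words hne s L hs lsub
    have hcount : pvExtend words (words.map (fun _ => (0 : Int))) 0
        (PySem.Str.slice review (some (s : Int)) none).toList = (m : Int) := by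
      have hsl : (PySem.Str.slice review (some (s : Int)) none).toList
          = review.toList.drop s := by
        simp [PySem.Str.toList_slice, PySem.List.slice_from_natCast]
      rw [hsl, pvExtend_eq words (review.toList.drop s) _ (words.map String.toList) 0
        (pvPtrRel_init words hne)]
      simp
      exact hmdef.symm
    simp only [List.map_cons, List.foldl_cons]
    rw [hA]
    simp only [hcount]
    by_cases hLm : L < m
    · rw [if_pos hLm, if_pos (show ((m : Int) > (L : Int)) by exact_mod_cast hLm)]
      exact ih (fun x hx => hss x (by simp [hx])) m _
    · rw [if_neg hLm, if_neg (show ¬ ((m : Int) > (L : Int)) by exact_mod_cast hLm)]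
      exact ih (fun x hx => hss x (by simp [hx])) L lsub

-- ===== VERDICT (by name: the statement is the Claim_ definition above) =====
theorem find_longest_substring_without_prohibited_subsequences_spec : Claim_equal_find_longest_substring_without_prohibited_subsequences := by
  intro review words _dom
  unfold Spec_find_longest_substring_without_prohibited_subsequences
  by_cases hemp : words.any (fun w => w == "")
  · have hB : find_longest_substring_without_prohibited_subsequences_alt review words
        = (0, "") := by
      unfold find_longest_substring_without_prohibited_subsequences_alt
      rw [if_pos hemp]
    have hex : ∃ w ∈ words, w.toList = [] := by
      rcases List.any_eq_true.mp hemp with ⟨w, hw, he⟩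
      exact ⟨w, hw, by simp [String.toList_eq_nil_iff]; exact eq_of_beq he⟩
    rw [pvA_empty_word review words hex, hB]
  · have hne : ∀ w ∈ words, w.toList ≠ [] := by
      intro w hw hnil
      apply hemp
      exact List.any_eq_true.mpr ⟨w, hw, by
        have : w = "" := String.toList_eq_nil_iff.mp hnil
        simp [this]⟩
    simp only [find_longest_substring_without_prohibited_subsequences,
      find_longest_substring_without_prohibited_subsequences_alt]
    rw [if_neg hemp]
    have hrange : PySem.List.pyRange 0 (PySem.Str.len review) 1
        = (List.range review.toList.length).map (fun k : Nat => (k : Int)) := by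
      rw [PySem.Str.len_eq]
      exact PySem.List.pyRange_zero_natCast _
    rw [hrange]
    have h0 : ((0 : Int), "") = (((0 : Nat) : Int), "") := by norm_num
    rw [h0]
    exact pvFold_eq review words hne (List.range _)
      (fun x hx => by rw [List.mem_range] at hx; omega) 0 ""
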